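-- pv_equiv track=rewrite | github.com/daehanchoi-dev/BOJ-BAEKJOONALGORITHM | 기능개발.py | solution
-- ===== SOURCE A (Python) =====
-- def solution(progresses, speeds):
--     ans = []
--     while len(progresses):  # Progresses 의 길이만큼 진행
--         No = False # 작업 미완료
--         cnt = 0 # 작업 완료
--         for i in range(len(progresses)):
--             progresses[i] += speeds[i]
--
--         while len(progresses) !=0  and progresses[0] >= 100: # 작업 할 것이 있고 첫 작업이 완료라면 반복
--             No = True
--             cnt += 1
--             del progresses[0] # 완료된 작업 삭제
--             del speeds[0] # 완료된 작업 삭제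
--
--         if No == True:
--             ans.append(cnt)
--
--     return ans
-- ===== SOURCE B (Python) =====
-- def solution(progresses, speeds):
--     # Closed form per task: finish day = max(1, ceil((100-p)/s)); one pass grouping by running max.
--     # Return-value equivalence only: A mutates its argument lists, B does not.
--     ans = []
--     cur = 0
--     cnt = 0
--     for p, s in zip(progresses, speeds):
--         d = max(1, -((p - 100) // s))
--         if cnt and d <= cur:
--             cnt += 1
--         else:
--             if cnt:
--                 ans.append(cnt)
--             cur = d
--             cnt = 1
--     if cnt:
--         ans.append(cnt)
--     return ans
-- ===== Notes on version B (the rewrite author's own statement) =====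
-- stated objective: alternative
-- what changed: Replaces A's day-by-day simulation (each day add speeds to every remaining task, then pop finished front tasks) by a closed-form finish day max(1, ceil((100-p)//s)) per task and a single pass that groups tasks by the running maximum finish day.
-- outside the precondition, e.g. on solution([150], [0]): A returns [1], B raises ZeroDivisionError; on solution([150, 98], [-1, 1]): A returns [1, 1], B returns [2]
import Mathlib
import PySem

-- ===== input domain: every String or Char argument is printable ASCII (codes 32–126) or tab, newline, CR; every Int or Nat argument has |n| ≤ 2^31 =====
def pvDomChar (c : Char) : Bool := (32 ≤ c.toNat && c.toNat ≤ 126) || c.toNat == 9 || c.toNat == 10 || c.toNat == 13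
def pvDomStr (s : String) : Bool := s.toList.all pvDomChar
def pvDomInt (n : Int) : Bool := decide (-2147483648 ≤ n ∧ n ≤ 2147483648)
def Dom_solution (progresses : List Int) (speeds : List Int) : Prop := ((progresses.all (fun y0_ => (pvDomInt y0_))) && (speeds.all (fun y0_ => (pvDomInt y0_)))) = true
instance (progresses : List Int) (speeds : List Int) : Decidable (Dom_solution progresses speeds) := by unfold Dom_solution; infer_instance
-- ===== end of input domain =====

-- B replaces A's day-by-day simulation by a closed-form finish day per task plus one
-- grouping pass (return-value equivalence only: A mutates its argument lists, B does not).

-- ===== PORT A =====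
-- inner `while`: pop the finished front tasks, deleting from both lists, counting pops
def popCount : List Int → List Int → Int × List Int × List Int
  | [], ss => (0, [], ss)
  | p :: ps, ss =>
    if p ≥ 100 then
      let r := popCount ps ss.tail
      (r.1 + 1, r.2.1, r.2.2)
    else (0, p :: ps, ss)

-- fuel for the outer `while`: with every speed ≥ 1 (Pre_), at most 100 - p days per task
def fuelFor (ps : List Int) : Nat := (ps.map (fun p => (100 - p).toNat + 1)).sum

-- outer `while len(progresses):` — one iteration per day
def aLoop : Nat → List Int → List Int → List Int → List Int
  | 0, _, _, ans => ans                    -- fuel exhausted (never happens under Pre_)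
  | _ + 1, [], _, ans => ans
  | fuel + 1, p :: ps, ss, ans =>
    let ps1 := ((p :: ps).zip ss).map (fun pr => pr.1 + pr.2)  -- progresses[i] += speeds[i]
    let r := popCount ps1 ss
    aLoop fuel r.2.1 r.2.2 (if r.1 ≠ 0 then ans ++ [r.1] else ans)

def solution (progresses : List Int) (speeds : List Int) : List Int :=
  aLoop (fuelFor progresses) progresses speeds []

-- ===== PORT B =====
-- fold over zip(progresses, speeds) with state (ans, cur, cnt)
def altGo : List (Int × Int) → List Int → Int → Int → List Int
  | [], ans, _, cnt => if cnt ≠ 0 then ans ++ [cnt] else ans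
  | (p, s) :: rest, ans, cur, cnt =>
    let d := max 1 (-(PySem.Int.floordiv (p - 100) s))
    if cnt ≠ 0 ∧ d ≤ cur then altGo rest ans cur (cnt + 1)
    else altGo rest (if cnt ≠ 0 then ans ++ [cnt] else ans) d 1

def solution_alt (progresses : List Int) (speeds : List Int) : List Int :=
  altGo (progresses.zip speeds) [] 0 0

-- ===== PRECONDITION & SPEC =====
-- Pre_ excludes inputs where speeds is shorter than progresses (A raises IndexError) and
-- inputs with a non-positive speed among the used ones, on which A loops forever or, where
-- it happens to return, the closed-form finish day is meaningless (B divides by zero or differs).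
def Pre_solution (progresses : List Int) (speeds : List Int) : Prop :=
  progresses.length ≤ speeds.length ∧ ∀ pr ∈ progresses.zip speeds, 1 ≤ pr.2

instance (progresses : List Int) (speeds : List Int) : Decidable (Pre_solution progresses speeds) := by
  unfold Pre_solution; infer_instance

def pvWitness_solution : List Int × List Int := ([93, 30, 55], [1, 30, 5])

def Spec_solution (progresses : List Int) (speeds : List Int) (out : List Int) : Prop := out = solution_alt progresses speeds
instance (progresses : List Int) (speeds : List Int) (out : List Int) : Decidable (Spec_solution progresses speeds out) := by unfold Spec_solution; infer_instance

-- ===== CLAIM (what is proved, stated in full; the proofs are below) =====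
def Claim_equal_solution : Prop := ∀ (progresses : List Int) (speeds : List Int), Dom_solution progresses speeds → Pre_solution progresses speeds → Spec_solution progresses speeds (solution progresses speeds)

-- ===== LEMMAS AND PROOFS =====

-- e = ceil((100-p)/s): remaining days task (p,s) needs (may be ≤ 0)
def ceilD (p s : Int) : Int := -(PySem.Int.floordiv (p - 100) s)

-- the simulation, abstracted to the lists of remaining-day counts
def popE : List Int → Int × List Int
  | [] => (0, [])
  | e :: es => if e ≤ 0 then let r := popE es; (r.1 + 1, r.2) else (0, e :: es)

def simE : Nat → List Int → List Int → List Int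
  | 0, _, ans => ans
  | _ + 1, [], ans => ans
  | fuel + 1, e :: es, ans =>
    let r := popE ((e :: es).map (· - 1))
    simE fuel r.2 (if r.1 ≠ 0 then ans ++ [r.1] else ans)

-- canonical grouping of the clipped finish-day list by running maximum
def goG : List Int → Int → Int → List Int
  | [], _, cnt => [cnt]
  | d :: rest, cur, cnt => if d ≤ cur then goG rest cur (cnt + 1) else cnt :: goG rest d 1

def groupsG : List Int → List Int
  | [] => []
  | d :: rest => goG rest d 1

def maxFN (es : List Int) : Nat := (es.map (fun e => (max 1 e).toNat)).foldr Nat.max 0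

theorem ceilD_nonpos_iff (p s : Int) (hs : 1 ≤ s) : (100 ≤ p) ↔ ceilD p s ≤ 0 := by
  unfold ceilD
  rw [neg_nonpos, PySem.Int.le_floordiv_iff_mul_le (by omega : (0:Int) < s)]
  constructor <;> intro h <;> omega

theorem ceilD_step (p s : Int) (hs : 1 ≤ s) : ceilD (p + s) s = ceilD p s - 1 := by
  unfold ceilD
  have hpos : (0:Int) < s := by omega
  have h1 := (PySem.Int.floordiv_eq_iff_of_pos (a := p - 100) (q := PySem.Int.floordiv (p - 100) s) hpos).mp rfl
  have h2 : PySem.Int.floordiv (p + s - 100) s = PySem.Int.floordiv (p - 100) s + 1 := by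
    rw [PySem.Int.floordiv_eq_iff_of_pos hpos]
    constructor <;> nlinarith [h1.1, h1.2]
  omega

theorem ceilD_fuel (p s : Int) (hs : 1 ≤ s) : (max 1 (ceilD p s)).toNat ≤ (100 - p).toNat + 1 := by
  unfold ceilD
  have hpos : (0:Int) < s := by omega
  have h1 := (PySem.Int.floordiv_eq_iff_of_pos (a := p - 100) (q := PySem.Int.floordiv (p - 100) s) hpos).mp rfl
  by_cases hq : 0 ≤ PySem.Int.floordiv (p - 100) s
  · omega
  · have : p - 100 ≤ PySem.Int.floordiv (p - 100) s := by nlinarith [h1.1, h1.2]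
    omega

theorem zip_map_zip (ps ss : List Int) (f : Int × Int → Int) :
    ((ps.zip ss).map f).zip ss = (ps.zip ss).map (fun pr => (f pr, pr.2)) := by
  induction ps generalizing ss with
  | nil => simp
  | cons p ps ih =>
    cases ss with
    | nil => simp
    | cons s ss =>
      simp only [List.zip_cons_cons, List.map_cons]
      exact congrArg _ (ih ss)

theorem popCount_corr (ps : List Int) : ∀ (ss : List Int), ps.length ≤ ss.length →
    (∀ pr ∈ ps.zip ss, 1 ≤ pr.2) →
    popE ((ps.zip ss).map (fun pr => ceilD pr.1 pr.2)) =
      ((popCount ps ss).1, (((popCount ps ss).2.1).zip ((popCount ps ss).2.2)).map (fun pr => ceilD pr.1 pr.2))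
    ∧ (popCount ps ss).2.1.length ≤ (popCount ps ss).2.2.length
    ∧ (∀ pr ∈ (popCount ps ss).2.1.zip (popCount ps ss).2.2, 1 ≤ pr.2) := by
  induction ps with
  | nil => intro ss h1 h2; simp [popCount, popE]
  | cons p ps ih =>
    intro ss h1 h2
    cases ss with
    | nil => simp at h1
    | cons s ss =>
      have hs : 1 ≤ s := h2 (p, s) (by simp)
      have h2' : ∀ pr ∈ ps.zip ss, 1 ≤ pr.2 := fun pr hpr => h2 pr (by simp [hpr])
      by_cases hp : 100 ≤ p
      · have he : ceilD p s ≤ 0 := (ceilD_nonpos_iff p s hs).mp hp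
        obtain ⟨ha, hb, hc⟩ := ih ss (by simpa using h1) h2'
        simp only [List.zip_cons_cons, List.map_cons, popE, popCount, if_pos he,
          if_pos (show p ≥ 100 from hp), List.tail_cons]
        exact ⟨by rw [ha], hb, hc⟩
      · have he : ¬ (ceilD p s ≤ 0) := fun h => hp ((ceilD_nonpos_iff p s hs).mpr h)
        simp only [List.zip_cons_cons, List.map_cons, popE, popCount, if_neg he,
          if_neg (show ¬ (p ≥ 100) from hp)]
        exact ⟨trivial, h1, h2⟩

theorem aLoop_simE (fuel : Nat) : ∀ (ps ss ans : List Int), ps.length ≤ ss.length →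
    (∀ pr ∈ ps.zip ss, 1 ≤ pr.2) →
    aLoop fuel ps ss ans = simE fuel ((ps.zip ss).map (fun pr => ceilD pr.1 pr.2)) ans := by
  induction fuel with
  | zero => intros; rfl
  | succ fuel ih =>
    intro ps ss ans hlen hs
    cases ps with
    | nil => simp [aLoop, simE]
    | cons p ps =>
      cases ss with
      | nil => simp at hlen
      | cons s ss =>
        have hcons : List.map (fun pr => ceilD pr.1 pr.2) ((p :: ps).zip (s :: ss)) = ceilD p s :: List.map (fun pr => ceilD pr.1 pr.2) (ps.zip ss) := by simp
        have hz : (((p :: ps).zip (s :: ss)).map (fun pr => pr.1 + pr.2)).zip (s :: ss)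
            = ((p :: ps).zip (s :: ss)).map (fun pr => (pr.1 + pr.2, pr.2)) :=
          zip_map_zip (p :: ps) (s :: ss) _
        have hmap : (((((p :: ps).zip (s :: ss)).map (fun pr => pr.1 + pr.2)).zip (s :: ss)).map
              (fun pr => ceilD pr.1 pr.2))
            = (((p :: ps).zip (s :: ss)).map (fun pr => ceilD pr.1 pr.2)).map (· - 1) := by
          rw [hz, List.map_map, List.map_map]
          apply List.map_congr_left
          intro pr hpr
          simp only [Function.comp]
          exact ceilD_step pr.1 pr.2 (hs pr hpr)
        have hlen1 : (((p :: ps).zip (s :: ss)).map (fun pr => pr.1 + pr.2)).length ≤ (s :: ss).length := by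
          simp
        have hs1 : ∀ pr ∈ ((((p :: ps).zip (s :: ss)).map (fun pr => pr.1 + pr.2)).zip (s :: ss)), 1 ≤ pr.2 := by
          rw [hz]
          intro pr hpr
          simp only [List.mem_map] at hpr
          obtain ⟨q, hq, rfl⟩ := hpr
          exact hs q hq
        obtain ⟨ha, hb, hc⟩ := popCount_corr _ _ hlen1 hs1
        rw [hcons]
        simp only [aLoop, simE]
        rw [ih _ _ _ hb hc, ← hcons, ← hmap, ha]

theorem le_foldr_max {l : List Nat} {x : Nat} (h : x ∈ l) : x ≤ l.foldr Nat.max 0 := by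
  induction l with
  | nil => simp at h
  | cons a l ih =>
    rcases List.mem_cons.mp h with h | h
    · simp [h, List.foldr]
    · have := ih h; simp [List.foldr]; omega

theorem foldr_max_le {l : List Nat} {b : Nat} (h : ∀ x ∈ l, x ≤ b) : l.foldr Nat.max 0 ≤ b := by
  induction l with
  | nil => simp
  | cons a l ih =>
    have h1 := h a (by simp)
    have h2 := ih (fun x hx => h x (by simp [hx]))
    simp [List.foldr]; omega

theorem maxFN_pos (e : Int) (es : List Int) : 1 ≤ maxFN (e :: es) := by
  have : (max 1 e).toNat ∈ (e :: es).map (fun e => (max 1 e).toNat) := by simp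
  have := le_foldr_max this
  unfold maxFN; omega

theorem maxFN_dec (es : List Int) (h2 : 2 ≤ maxFN es) : maxFN (es.map (· - 1)) ≤ maxFN es - 1 := by
  unfold maxFN
  apply foldr_max_le
  intro x hx
  simp only [List.map_map, List.mem_map, Function.comp] at hx
  obtain ⟨e, he, rfl⟩ := hx
  have hmem : (max 1 e).toNat ∈ es.map (fun e => (max 1 e).toNat) := List.mem_map.mpr ⟨e, he, rfl⟩
  have := le_foldr_max hmem
  unfold maxFN at h2
  omega

theorem maxFN_dropWhile (es : List Int) : maxFN (es.dropWhile (fun e => e ≤ 1)) ≤ maxFN es := by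
  unfold maxFN
  apply foldr_max_le
  intro x hx
  simp only [List.mem_map] at hx
  obtain ⟨e, he, rfl⟩ := hx
  exact le_foldr_max (List.mem_map.mpr ⟨e, (List.dropWhile_sublist (l := es) (p := fun e => e ≤ 1)).mem he, rfl⟩)

theorem goG_dec (ds : List Int) : ∀ (cur cnt : Int), (∀ d ∈ ds, 1 ≤ d) → 2 ≤ cur →
    goG (ds.map (fun d => max 1 (d - 1))) (cur - 1) cnt = goG ds cur cnt := by
  induction ds with
  | nil => intros; rfl
  | cons d ds ih =>
    intro cur cnt hall hcur
    have hd : 1 ≤ d := hall d (by simp)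
    have hall' : ∀ d ∈ ds, 1 ≤ d := fun x hx => hall x (by simp [hx])
    by_cases h : d ≤ cur
    · simp only [List.map_cons, goG, if_pos h, if_pos (show max 1 (d - 1) ≤ cur - 1 by omega)]
      exact ih _ _ hall' hcur
    · have h3 : ¬ (max 1 (d - 1) ≤ cur - 1) := by omega
      simp only [List.map_cons, goG, if_neg h, if_neg h3]
      rw [show max 1 (d - 1) = d - 1 by omega]
      exact congrArg _ (ih _ _ hall' (by omega))

theorem groupsG_dec (es : List Int) (h : es = [] ∨ ∃ e es', es = e :: es' ∧ 2 ≤ e) :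
    groupsG ((es.map (· - 1)).map (fun e => max 1 e)) = groupsG (es.map (fun e => max 1 e)) := by
  rcases h with rfl | ⟨e, es', rfl, he⟩
  · rfl
  · simp only [List.map_cons, List.map_map, groupsG]
    rw [show max 1 (e - 1) = (max 1 e) - 1 by omega]
    have hmm : es'.map ((fun e => max 1 e) ∘ (· - 1)) = (es'.map (fun e => max 1 e)).map (fun d => max 1 (d - 1)) := by
      simp only [List.map_map]; congr 1; funext x; simp [Function.comp]; omega
    rw [hmm]
    exact goG_dec _ _ _ (by intro x hx; simp only [List.mem_map] at hx; obtain ⟨y, _, rfl⟩ := hx; omega) (by omega)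

theorem popE_char (es : List Int) :
    popE (es.map (· - 1)) =
      (((es.takeWhile (fun e => e ≤ 1)).length : Int), (es.dropWhile (fun e => e ≤ 1)).map (· - 1)) := by
  induction es with
  | nil => simp [popE]
  | cons e es ih =>
    by_cases h : e ≤ 1
    · simp [popE, List.takeWhile, List.dropWhile, h, ih, show e - 1 ≤ 0 by omega]
    · simp [popE, List.takeWhile, List.dropWhile, h, show ¬ (e - 1 ≤ 0) by omega]

theorem goG_one (ds : List Int) : ∀ (cnt : Int), (∀ d ∈ ds, 1 ≤ d) →
    goG ds 1 cnt = (cnt + ((ds.takeWhile (fun d => d ≤ 1)).length : Int)) ::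
      groupsG (ds.dropWhile (fun d => d ≤ 1)) := by
  induction ds with
  | nil => intros; simp [goG, groupsG]
  | cons d ds ih =>
    intro cnt hall
    have hd : 1 ≤ d := hall d (by simp)
    have hall' : ∀ x ∈ ds, 1 ≤ x := fun x hx => hall x (by simp [hx])
    by_cases h : d ≤ 1
    · simp only [goG, if_pos h, List.takeWhile, List.dropWhile, show decide (d ≤ 1) = true by simp [h]]
      rw [ih _ hall']
      simp; ring_nf
    · simp only [goG, if_neg h, List.takeWhile, List.dropWhile, show decide (d ≤ 1) = false by simp [h]]
      simp [groupsG]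

theorem takeWhile_max1 (es : List Int) :
    ((es.map (fun e => max 1 e)).takeWhile (fun d => d ≤ 1)).length = (es.takeWhile (fun e => e ≤ 1)).length := by
  induction es with
  | nil => rfl
  | cons e es ih =>
    by_cases h : e ≤ 1
    · simp only [List.map_cons, List.takeWhile, show decide (e ≤ 1) = true by simp [h],
        show decide (max 1 e ≤ 1) = true by simp; omega]
      simp [ih]
    · simp only [List.map_cons, List.takeWhile, show decide (e ≤ 1) = false by simp [h],
        show decide (max 1 e ≤ 1) = false by simp; omega]

theorem dropWhile_max1 (es : List Int) :
    (es.map (fun e => max 1 e)).dropWhile (fun d => d ≤ 1) = (es.dropWhile (fun e => e ≤ 1)).map (fun e => max 1 e) := by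
  induction es with
  | nil => rfl
  | cons e es ih =>
    by_cases h : e ≤ 1
    · simp only [List.map_cons, List.dropWhile, show decide (e ≤ 1) = true by simp [h],
        show decide (max 1 e ≤ 1) = true by simp; omega]
      exact ih
    · simp only [List.map_cons, List.dropWhile, show decide (e ≤ 1) = false by simp [h],
        show decide (max 1 e ≤ 1) = false by simp; omega]

theorem simE_eq (fuel : Nat) : ∀ (es ans : List Int), maxFN es ≤ fuel →
    simE fuel es ans = ans ++ groupsG (es.map (fun e => max 1 e)) := by
  induction fuel with
  | zero =>
    intro es ans h
    cases es with
    | nil => simp [simE, groupsG]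
    | cons e es => have := maxFN_pos e es; omega
  | succ fuel ih =>
    intro es ans h
    cases es with
    | nil => simp [simE, groupsG]
    | cons e es =>
      simp only [simE, popE_char (e :: es)]
      by_cases h2 : 2 ≤ e
      · -- front task unfinished: nothing pops
        have ht : List.takeWhile (fun e => decide (e ≤ 1)) (e :: es) = [] := by
          simp [List.takeWhile, show ¬ (e ≤ 1) by omega]
        have hd : List.dropWhile (fun e => decide (e ≤ 1)) (e :: es) = e :: es := by
          simp [List.dropWhile, show ¬ (e ≤ 1) by omega]
        rw [ht, hd]
        norm_num
        rw [show ((e - 1) :: List.map (fun x => x - 1) es) = List.map (fun x => x - 1) (e :: es) from rfl]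
        have hm2 : 2 ≤ maxFN (e :: es) := by
          have : (max 1 e).toNat ∈ (e :: es).map (fun e => (max 1 e).toNat) := by simp
          have := le_foldr_max this
          unfold maxFN; omega
        rw [ih _ _ (by have := maxFN_dec (e :: es) hm2; omega)]
        rw [groupsG_dec (e :: es) (Or.inr ⟨e, es, rfl, h2⟩)]
        simp
      · -- front task finishes: the first group pops
        have hk : List.takeWhile (fun e => decide (e ≤ 1)) (e :: es) = e :: List.takeWhile (fun e => decide (e ≤ 1)) es := by
          simp [List.takeWhile, show e ≤ 1 by omega]
        have hdm : List.dropWhile (fun e => decide (e ≤ 1)) (e :: es) = List.dropWhile (fun e => decide (e ≤ 1)) es := by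
          simp [List.dropWhile, show e ≤ 1 by omega]
        rw [hk, hdm]
        set rest := List.dropWhile (fun e => decide (e ≤ 1)) es with hrest
        set k : Int := ((e :: List.takeWhile (fun e => decide (e ≤ 1)) es).length : Int) with hkdef
        have hk0 : k ≠ 0 := by
          rw [hkdef]
          have : 0 < (e :: List.takeWhile (fun e => decide (e ≤ 1)) es).length := by simp
          omega
        rw [if_pos hk0]
        -- fuel for the recursive call
        have hfuel : maxFN (rest.map (· - 1)) ≤ fuel := by
          have hdw : maxFN rest ≤ maxFN (e :: es) := by
            have h1 : maxFN rest ≤ maxFN es := maxFN_dropWhile es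
            have : maxFN es ≤ maxFN (e :: es) := by
              unfold maxFN
              apply foldr_max_le
              intro x hx
              apply le_foldr_max
              simp only [List.map_cons, List.mem_cons]
              exact Or.inr hx
            omega
          cases hre : rest with
          | nil => simp [maxFN]
          | cons e' es' =>
            have he' : ¬ (e' ≤ 1) := by
              have := List.head?_dropWhile_not (p := fun e => decide (e ≤ 1)) (l := es)
              rw [← hrest, hre] at this
              simpa using this
            have hm2 : 2 ≤ maxFN rest := by
              rw [hre]
              have : (max 1 e').toNat ∈ (e' :: es').map (fun e => (max 1 e).toNat) := by simp
              have := le_foldr_max this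
              unfold maxFN; omega
            have hdec := maxFN_dec rest hm2
            rw [hre] at hdec hdw
            omega
        rw [ih _ _ hfuel]
        -- identify the groups
        have hall : ∀ d ∈ (es.map (fun e => max 1 e)), 1 ≤ d := by
          intro d hd; simp only [List.mem_map] at hd; obtain ⟨y, _, rfl⟩ := hd; omega
        have hgd : groupsG ((rest.map (· - 1)).map (fun e => max 1 e)) = groupsG (rest.map (fun e => max 1 e)) := by
          apply groupsG_dec
          cases hre : rest with
          | nil => exact Or.inl rfl
          | cons e' es' =>
            have he' : ¬ (e' ≤ 1) := by
              have := List.head?_dropWhile_not (p := fun e => decide (e ≤ 1)) (l := es)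
              rw [← hrest, hre] at this
              simpa using this
            exact Or.inr ⟨e', es', rfl, by omega⟩
        rw [hgd]
        have hg : groupsG ((e :: es).map (fun e => max 1 e)) =
            k :: groupsG (rest.map (fun e => max 1 e)) := by
          have h1e : max 1 e = 1 := by omega
          simp only [List.map_cons, h1e, groupsG]
          rw [goG_one _ _ hall, takeWhile_max1, dropWhile_max1, ← hrest]
          congr 1
          rw [hkdef]
          simp only [List.length_cons]
          push_cast
          omega
        rw [hg]
        simp

theorem altGo_goG (pairs : List (Int × Int)) : ∀ (ans : List Int) (cur cnt : Int), 1 ≤ cnt →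
    altGo pairs ans cur cnt = ans ++ goG (pairs.map (fun pr => max 1 (ceilD pr.1 pr.2))) cur cnt := by
  induction pairs with
  | nil => intro ans cur cnt h; simp [altGo, goG, show cnt ≠ 0 by omega]
  | cons pr rest ih =>
    intro ans cur cnt h
    obtain ⟨p, s⟩ := pr
    have hd : max 1 (-(PySem.Int.floordiv (p - 100) s)) = max 1 (ceilD p s) := rfl
    by_cases hle : max 1 (ceilD p s) ≤ cur
    · simp only [altGo, List.map_cons, goG, hd]
      rw [if_pos ⟨show cnt ≠ 0 by omega, hle⟩, if_pos hle]
      exact ih ans cur (cnt + 1) (by omega)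
    · simp only [altGo, List.map_cons, goG, hd]
      rw [if_neg (fun hc => hle hc.2), if_pos (show cnt ≠ 0 by omega), if_neg hle]
      rw [ih (ans ++ [cnt]) _ 1 (by omega)]
      simp

theorem solution_alt_eq (ps ss : List Int) :
    solution_alt ps ss = groupsG ((ps.zip ss).map (fun pr => max 1 (ceilD pr.1 pr.2))) := by
  unfold solution_alt
  cases hz : ps.zip ss with
  | nil => simp [altGo, groupsG]
  | cons pr rest =>
    obtain ⟨p, s⟩ := pr
    have hd : max 1 (-(PySem.Int.floordiv (p - 100) s)) = max 1 (ceilD p s) := rfl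
    simp only [altGo, List.map_cons, groupsG, hd]
    norm_num
    rw [altGo_goG rest [] _ 1 (by omega)]
    simp

theorem maxFN_fuelFor (ps : List Int) : ∀ (ss : List Int), ps.length ≤ ss.length →
    (∀ pr ∈ ps.zip ss, 1 ≤ pr.2) →
    maxFN ((ps.zip ss).map (fun pr => ceilD pr.1 pr.2)) ≤ fuelFor ps := by
  induction ps with
  | nil => intro ss _ _; simp [maxFN, fuelFor]
  | cons p ps ih =>
    intro ss hlen hs
    cases ss with
    | nil => simp at hlen
    | cons s ss =>
      have hsp : 1 ≤ s := hs (p, s) (by simp)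
      have hrec := ih ss (by simpa using hlen) (fun pr hpr => hs pr (by simp [hpr]))
      have hel := ceilD_fuel p s hsp
      unfold maxFN fuelFor at *
      simp only [List.zip_cons_cons, List.map_cons, List.foldr_cons, List.sum_cons]
      exact Nat.max_le.mpr ⟨le_trans hel (by omega), le_trans hrec (by omega)⟩

-- ===== VERDICT (by name: the statement is the Claim_ definition above) =====
theorem solution_spec : Claim_equal_solution := by
  unfold Claim_equal_solution
  intro ps ss _ hpre
  obtain ⟨hlen, hs⟩ := hpre
  unfold Spec_solution solution
  rw [aLoop_simE _ ps ss [] hlen hs,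
    simE_eq _ _ _ (maxFN_fuelFor ps ss hlen hs),
    solution_alt_eq, List.map_map]
  rfl
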